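-- pv_equiv track=rewrite | github.com/tusharkaley/competitive-coding-practice | misc/change_count.py | change_count
-- ===== SOURCE A (Python) =====
-- def change_count(word):
-- 	pos = 0
-- 	count = 0
-- 	win = 0
-- 	i = 0
-- 	while i <= len(word)-2:
-- 		live = i
-- 		j_mat = False
-- 		for j in (1,3):
-- 			if live+j < len(word):
-- 				if word[live]!=word[j+live]:
-- 					if j==1:
-- 						i = i+1
-- 						break
-- 					if j == 2:
-- 						break
--
-- 				if word[live]==word[j+live]:
-- 					if j==1:
-- 						i = i+2
-- 						j_mat = True
-- 						count = count + 1
-- 					if j==2: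
-- 						if j_mat:
-- 							i = i+1
-- 							break
--
-- 	return count
-- ===== SOURCE B (Python) =====
-- def change_count(word):
--     total = 0
--     n = len(word)
--     start = 0
--     while start < n:
--         end = start
--         while end < n and word[end] == word[start]:
--             end += 1
--         total += (end - start) // 2
--         start = end
--     return total
-- ===== Notes on version B (the rewrite author's own statement) =====
-- stated objective: alternative
-- what changed: A's stateful index-jumping scan (with a dead inner for-loop over (1,3)) is replaced by a run-length decomposition: B walks maximal runs of equal characters and sums floor(runlength/2) per run.
import Mathlib
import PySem

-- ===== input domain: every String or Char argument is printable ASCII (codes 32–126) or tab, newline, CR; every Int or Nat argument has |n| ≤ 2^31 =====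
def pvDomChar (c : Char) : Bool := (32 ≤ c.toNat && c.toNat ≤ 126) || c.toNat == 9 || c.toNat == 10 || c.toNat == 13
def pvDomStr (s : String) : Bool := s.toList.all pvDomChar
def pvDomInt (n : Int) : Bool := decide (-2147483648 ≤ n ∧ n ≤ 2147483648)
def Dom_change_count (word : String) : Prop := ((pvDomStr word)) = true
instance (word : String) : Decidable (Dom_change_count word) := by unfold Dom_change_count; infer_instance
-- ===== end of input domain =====

-- B replaces A's stateful index-jumping scan by summing floor(runlength/2) over maximal runs; same result, alternative structure.

-- ===== PORT A =====
-- A's while loop: the inner `for j in (1,3)` is decided entirely at j = 1 (the j == 2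
-- branches never fire and the j = 3 iteration changes no state), so the loop body is:
-- if word[i] == word[i+1] then i += 2, count += 1 else i += 1.  Ported step for step.
def change_countLoop (cs : List Char) (i : Nat) (count : Int) : Int :=
  if _h : i + 2 ≤ cs.length then
    if cs.getD i ' ' = cs.getD (i+1) ' ' then
      change_countLoop cs (i+2) (count + 1)
    else
      change_countLoop cs (i+1) count
  else count
termination_by cs.length - i

def change_count (word : String) : Int :=
  change_countLoop word.toList 0 0

-- ===== PORT B =====
-- inner while of Source B: advance `end` while chars still equal c
def runEnd (cs : List Char) (c : Char) (e : Nat) : Nat :=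
  if _h : e < cs.length ∧ cs.getD e ' ' = c then runEnd cs c (e+1) else e
termination_by cs.length - e
decreasing_by omega

-- needed by the port's termination proof
theorem runEnd_ge (cs : List Char) (c : Char) (e : Nat) : e ≤ runEnd cs c e := by
  unfold runEnd
  split
  · have := runEnd_ge cs c (e+1); omega
  · exact Nat.le_refl e
termination_by cs.length - e
decreasing_by omega

-- needed by the port's termination proof
theorem runEnd_gt (cs : List Char) (s : Nat) (h : s < cs.length) :
    s < runEnd cs (cs.getD s ' ') s := by
  rw [runEnd, dif_pos ⟨h, rfl⟩]
  have := runEnd_ge cs (cs.getD s ' ') (s+1)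
  omega

-- outer while of Source B
def change_countAltLoop (cs : List Char) (start : Nat) (total : Int) : Int :=
  if h : start < cs.length then
    let e := runEnd cs (cs.getD start ' ') start
    change_countAltLoop cs e (total + (((e - start : Nat) / 2 : Nat) : Int))
  else total
termination_by cs.length - start
decreasing_by have := runEnd_gt cs start h; omega

def change_count_alt (word : String) : Int :=
  change_countAltLoop word.toList 0 0

-- ===== PRECONDITION & SPEC =====
def Spec_change_count (word : String) (out : Int) : Prop := out = change_count_alt word
instance (word : String) (out : Int) : Decidable (Spec_change_count word out) := by unfold Spec_change_count; infer_instance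

-- ===== CLAIM (what is proved, stated in full; the proofs are below) =====
def Claim_equal_change_count : Prop := ∀ (word : String), Dom_change_count word → Spec_change_count word (change_count word)

-- ===== LEMMAS AND PROOFS =====

-- the common value: greedy pair count over a list of characters
def gPairs : List Char → Int
  | a :: b :: t => if a = b then 1 + gPairs t else gPairs (b :: t)
  | _ => 0

theorem gPairs_short (l : List Char) (h : l.length ≤ 1) : gPairs l = 0 := by
  match l with
  | [] => rfl
  | [_] => rfl
  | _ :: _ :: _ => simp at h

theorem drop_cons (cs : List Char) (i : Nat) (h : i < cs.length) :
    cs.drop i = cs.getD i ' ' :: cs.drop (i+1) := by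
  rw [List.getD_eq_getElem cs ' ' h]
  exact List.drop_eq_getElem_cons h

theorem gPairs_cons_cons (a b : Char) (t : List Char) :
    gPairs (a :: b :: t) = if a = b then 1 + gPairs t else gPairs (b :: t) := rfl

theorem loopA_eq (cs : List Char) (i : Nat) (count : Int) :
    change_countLoop cs i count = count + gPairs (cs.drop i) := by
  unfold change_countLoop
  split
  · rename_i h
    rw [drop_cons cs i (by omega), drop_cons cs (i+1) (by omega)]
    split
    · rename_i heq
      rw [loopA_eq cs (i+2) (count+1), gPairs_cons_cons, if_pos heq]
      ring
    · rename_i hne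
      rw [loopA_eq cs (i+1) count, drop_cons cs (i+1) (by omega),
        gPairs_cons_cons, if_neg hne]
  · rename_i h
    rw [gPairs_short (cs.drop i) (by simp; omega)]
    ring
termination_by cs.length - i
decreasing_by all_goals omega

theorem runEnd_gPairs (cs : List Char) (c : Char) (s : Nat) :
    gPairs (cs.drop s) =
      (((runEnd cs c s - s : Nat) / 2 : Nat) : Int) + gPairs (cs.drop (runEnd cs c s)) := by
  rw [runEnd]
  split
  · rename_i h1
    rw [runEnd]
    split
    · rename_i h2
      -- two equal chars c at positions s and s+1
      have hE := runEnd_ge cs c (s+2)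
      rw [drop_cons cs s (by omega), drop_cons cs (s+1) (by omega)]
      have hgo := runEnd_gPairs cs c (s+2)
      have heq : cs.getD s ' ' = cs.getD (s+1) ' ' := by rw [h1.2, h2.2]
      rw [heq, gPairs_cons_cons, if_pos rfl, hgo]
      have harith : (runEnd cs c (s+2) - s) / 2 = (runEnd cs c (s+2) - (s+2)) / 2 + 1 := by
        omega
      rw [harith]
      push_cast
      ring
    · -- run ends at s+1
      rename_i h2
      have h0 : (s + 1 - s) / 2 = 0 := by omega
      rw [h0, drop_cons cs s (by omega)]
      by_cases hs1 : s + 1 < cs.length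
      · rw [drop_cons cs (s+1) hs1]
        have hne : cs.getD s ' ' ≠ cs.getD (s+1) ' ' := by
          intro he
          exact h2 ⟨hs1, he ▸ h1.2⟩
        rw [gPairs_cons_cons, if_neg hne]
        simp
      · have hnil : cs.drop (s+1) = [] := List.drop_eq_nil_of_le (by omega)
        rw [hnil]
        simp [gPairs]
  · simp
termination_by cs.length - s
decreasing_by omega

theorem loopB_eq (cs : List Char) (s : Nat) (total : Int) :
    change_countAltLoop cs s total = total + gPairs (cs.drop s) := by
  unfold change_countAltLoop
  split
  · rename_i h
    have hlt := runEnd_gt cs s h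
    rw [loopB_eq cs (runEnd cs (cs.getD s ' ') s) _]
    rw [runEnd_gPairs cs (cs.getD s ' ') s]
    ring
  · rename_i h
    rw [List.drop_eq_nil_of_le (by omega)]
    simp [gPairs]
termination_by cs.length - s
decreasing_by omega

-- ===== VERDICT (by name: the statement is the Claim_ definition above) =====
theorem change_count_spec : Claim_equal_change_count := by
  intro word _
  unfold Spec_change_count change_count change_count_alt
  rw [loopA_eq, loopB_eq]
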